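-- pv_equiv track=rewrite | github.com/Dam0305/Algorithm | Programmers/후보키.py | solution
-- ===== SOURCE A (Python) =====
-- import itertools
--
-- def solution(relation):
--     #인덱스로 비교하기 위함
--     idx = [i for i in range(len(relation[0]))]
--     coms = []
--
--     #인덱스 조합
--     for i in range(1, len(relation)+1):
--         coms.extend(itertools.combinations(idx, i))
--
--     unique = []
--
--     for com in coms:
--         tmp = []
--         for rel in relation:
--             arr = []
--             #인덱스와 정보 매칭
--             for i in range(len(com)):
--                 arr.append(rel[com[i]])
--             tmp.append(arr)
--
--         uni = True
--         for t in tmp: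
--             #유일성 만족 확인
--             if tmp.count(t) != 1:
--                 uni = False
--
--         #유일성 만족하면 최소성 확인
--         if uni:
--             mini = True
--             for item in unique:
--                 if set(item).issubset(com): #부분집합인지 확인 -> 최소성 확인
--                     mini = False
--             if mini:
--                 unique.append(com)
--     return len(unique)
-- ===== SOURCE B (Python) =====
-- import itertools
--
-- def solution(relation):
--     n_cols = len(relation[0])
--     superkeys = set()
--     for size in range(1, len(relation) + 1):
--         for com in itertools.combinations(range(n_cols), size):
--             proj = [tuple(row[c] for c in com) for row in relation]
--             if len(set(proj)) == len(proj):
--                 superkeys.add(frozenset(com))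
--     count = 0
--     for key in superkeys:
--         minimal = all(frozenset(sub) not in superkeys
--                       for r in range(1, len(key))
--                       for sub in itertools.combinations(sorted(key), r))
--         if minimal:
--             count += 1
--     return count
-- ===== Notes on version B (the rewrite author's own statement) =====
-- stated objective: faster
-- what changed: A greedily accepts a combination as minimal by checking it only against the previously accepted list, and tests uniqueness with list.count inside a loop (quadratic in the number of rows per combination); B first collects the full set of superkeys using a hash-set distinctness test (linear in rows per combination) and then counts the members none of whose proper sub-combinations lies in that set.
-- outside the precondition, e.g. on solution([]): A raises IndexError, B raises IndexError; on solution([['a', 'b'], ['c']]): A raises IndexError, B raises IndexError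
import Mathlib
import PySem

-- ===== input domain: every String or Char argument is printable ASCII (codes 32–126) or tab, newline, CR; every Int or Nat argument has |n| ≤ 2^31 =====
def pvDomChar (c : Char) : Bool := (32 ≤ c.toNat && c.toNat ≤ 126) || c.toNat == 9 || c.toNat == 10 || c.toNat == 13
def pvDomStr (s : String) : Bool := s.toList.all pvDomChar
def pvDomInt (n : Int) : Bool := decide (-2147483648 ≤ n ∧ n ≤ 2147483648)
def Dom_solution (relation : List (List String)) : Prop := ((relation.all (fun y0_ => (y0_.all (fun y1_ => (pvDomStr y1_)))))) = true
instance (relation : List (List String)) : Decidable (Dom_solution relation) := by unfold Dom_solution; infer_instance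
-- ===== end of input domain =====

-- B re-implements A by collecting ALL superkeys into a set first (hash-set distinctness test
-- instead of A's list.count loop) and then counting the minimal ones by subset enumeration;
-- objective: faster (measured).

-- ===== PORT A =====
-- rel[com[i]] is ported as List.getD: exact on Pre_ (indices < len(relation[0]) ≤ every row length).
def solution (relation : List (List String)) : Int :=
  let idx := List.range (relation.headD []).length
  let coms := (List.range relation.length).foldl
      (fun acc i => acc ++ PySem.List.combinations idx (i + 1)) []
  let unique := coms.foldl (fun unique com =>
    let tmp := relation.map (fun rel => com.map (fun i => rel.getD i ""))
    let uni := tmp.foldl (fun uni t => if tmp.count t != 1 then false else uni) true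
    if uni then
      let mini := unique.foldl (fun mini item =>
        if item.all (fun x => com.contains x) then false else mini) true
      if mini then unique ++ [com] else unique
    else unique) []
  (unique.length : Int)

-- ===== PORT B =====
-- frozenset(com) is modelled by the combination list itself: every stored com is a strictly
-- increasing list of column indices, so frozenset equality coincides with list equality, and
-- sorted(key) = key.  The final loop over the set only counts, so set iteration order is immaterial.
def solution_alt (relation : List (List String)) : Int :=
  let ncols := (relation.headD []).length
  let superkeys : PySem.Set (List Nat) :=
    (List.range relation.length).foldl (fun sk size =>
      (PySem.List.combinations (List.range ncols) (size + 1)).foldl (fun sk com =>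
        let proj := relation.map (fun row => com.map (fun c => row.getD c ""))
        if (PySem.Set.ofList proj).length = proj.length then PySem.Set.add sk com
        else sk) sk) PySem.Set.empty
  superkeys.foldl (fun cnt key =>
    let minimal := ((List.range key.length).drop 1).all (fun r =>
      (PySem.List.combinations key r).all (fun sub => !(PySem.Set.contains superkeys sub)))
    if minimal then cnt + 1 else cnt) (0 : Int)

-- ===== PRECONDITION & SPEC =====
-- Pre_ excludes exactly the inputs where the Python raises IndexError: the empty relation
-- (relation[0]) and relations with a row shorter than the first row (rel[com[i]]).
def Pre_solution (relation : List (List String)) : Prop :=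
  relation ≠ [] ∧ ∀ r ∈ relation, (relation.headD []).length ≤ r.length
instance (relation : List (List String)) : Decidable (Pre_solution relation) := by
  unfold Pre_solution; infer_instance
def pvWitness_solution : List (List String) := [["a", "a"], ["a", "b"]]
def Spec_solution (relation : List (List String)) (out : Int) : Prop := out = solution_alt relation
instance (relation : List (List String)) (out : Int) : Decidable (Spec_solution relation out) := by
  unfold Spec_solution; infer_instance

-- ===== CLAIM (what is proved, stated in full; the proofs are below) =====
def Claim_equal_solution : Prop := ∀ (relation : List (List String)),
  Dom_solution relation → Pre_solution relation → Spec_solution relation (solution relation)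

-- ===== LEMMAS AND PROOFS =====

-- the projection of the relation onto a list of column indices
def projAll (relation : List (List String)) (c : List Nat) : List (List String) :=
  relation.map (fun rel => c.map (fun i => rel.getD i ""))

-- "c is a superkey": the projected rows are pairwise distinct
def superT (relation : List (List String)) (c : List Nat) : Bool :=
  decide (projAll relation c).Nodup

-- "c is minimal w.r.t. the collection sk": no other member of sk is a (set-)subset of c
def minT (sk : List (List Nat)) (c : List Nat) : Bool :=
  sk.all (fun s => s == c || !(s.all (fun x => decide (x ∈ c))))

-- the list of all enumerated column combinations
def allComs (relation : List (List String)) : List (List Nat) :=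
  (List.range relation.length).flatMap
    (fun i => PySem.List.combinations (List.range (relation.headD []).length) (i + 1))

lemma combinations_nodup {α : Type} [DecidableEq α] (xs : List α) (r : Nat) (h : xs.Nodup) :
    (PySem.List.combinations xs r).Nodup := by
  induction xs generalizing r with
  | nil => cases r <;> simp [PySem.List.combinations_zero, PySem.List.combinations_nil_succ]
  | cons x xs ih =>
    cases r with
    | zero => simp [PySem.List.combinations_zero]
    | succ r =>
      rw [PySem.List.combinations_cons_succ]
      obtain ⟨hx, hxs⟩ := List.nodup_cons.mp h
      refine List.Nodup.append (List.Nodup.map ?_ (ih r hxs)) (ih (r+1) hxs) ?_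
      · intro a b hab; injection hab
      · intro c hc1 hc2
        obtain ⟨c', hc', rfl⟩ := List.mem_map.mp hc1
        have := (PySem.List.mem_combinations_iff _ _ _).mp hc2
        exact hx (this.1.subset (List.mem_cons_self))

-- a subset between strictly increasing lists is a sublist
lemma sublist_of_subset_sorted (u v : List Nat) (hu : u.Pairwise (· < ·))
    (hv : v.Pairwise (· < ·)) (h : ∀ x ∈ u, x ∈ v) : u.Sublist v := by
  induction v generalizing u with
  | nil => simp [List.eq_nil_iff_forall_not_mem.mpr (fun x hx => by simpa using h x hx)]
  | cons y v' ih =>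
    cases u with
    | nil => exact List.nil_sublist _
    | cons x u' =>
      have hxy := h x List.mem_cons_self
      by_cases hxeq : x = y
      · subst hxeq
        refine List.Sublist.cons₂ _ (ih u' (List.pairwise_cons.mp hu).2
          (List.pairwise_cons.mp hv).2 ?_)
        intro z hz
        have hxz : x < z := (List.pairwise_cons.mp hu).1 z hz
        rcases List.mem_cons.mp (h z (List.mem_cons_of_mem _ hz)) with h1 | h2
        · omega
        · exact h2
      · have hxv' : x ∈ v' := by
          rcases List.mem_cons.mp hxy with h1 | h1
          · exact absurd h1 hxeq
          · exact h1
        refine List.Sublist.cons _ (ih (x :: u') hu (List.pairwise_cons.mp hv).2 ?_)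
        intro z hz
        rcases List.mem_cons.mp (h z hz) with h1 | h1
        · have hyx : y < x := (List.pairwise_cons.mp hv).1 x hxv'
          rcases List.mem_cons.mp hz with h2 | h2
          · omega
          · have := (List.pairwise_cons.mp hu).1 z h2; omega
        · exact h1

-- every superkey in sk contains a minimal superkey of sk
lemma exists_minimal (sk : List (List Nat)) (hs : ∀ s ∈ sk, s.Pairwise (· < ·)) :
    ∀ (n : Nat) (c : List Nat), c.length ≤ n → c ∈ sk →
      ∃ m ∈ sk, (∀ x ∈ m, x ∈ c) ∧ minT sk m = true := by
  intro n
  induction n with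
  | zero =>
    intro c hlen hc
    by_cases hm : minT sk c = true
    · exact ⟨c, hc, fun x hx => hx, hm⟩
    · exfalso
      simp only [minT, List.all_eq_true, Bool.or_eq_true, beq_iff_eq, Bool.not_eq_true',
        List.all_eq_false] at hm
      push Not at hm
      obtain ⟨s, hsmem, hne, hsub⟩ := hm
      have hsl := sublist_of_subset_sorted s c (hs s hsmem) (hs c hc) (by simpa using hsub)
      have := hsl.length_le
      have hlt : s.length < c.length := by
        rcases Nat.lt_or_ge s.length c.length with h | h
        · exact h
        · exact absurd (hsl.eq_of_length (by omega)) hne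
      omega
  | succ n ih =>
    intro c hlen hc
    by_cases hm : minT sk c = true
    · exact ⟨c, hc, fun x hx => hx, hm⟩
    · simp only [minT, List.all_eq_true, Bool.or_eq_true, beq_iff_eq, Bool.not_eq_true',
        List.all_eq_false] at hm
      push Not at hm
      obtain ⟨s, hsmem, hne, hsub⟩ := hm
      have hsl := sublist_of_subset_sorted s c (hs s hsmem) (hs c hc) (by simpa using hsub)
      have hle := hsl.length_le
      have hlt : s.length < c.length := by
        rcases Nat.lt_or_ge s.length c.length with h | h
        · exact h
        · exact absurd (hsl.eq_of_length (by omega)) hne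
      have hsub' : ∀ x ∈ s, x ∈ c := by simpa using hsub
      obtain ⟨m, hm1, hm2, hm3⟩ := ih s (by omega) hsmem
      exact ⟨m, hm1, fun x hx => hsub' x (hm2 x hx), hm3⟩

lemma mem_allComs {relation : List (List String)} {c : List Nat} (h : c ∈ allComs relation) :
    c.Sublist (List.range (relation.headD []).length) ∧ 1 ≤ c.length ∧ c.length ≤ relation.length := by
  simp only [allComs, List.mem_flatMap, List.mem_range] at h
  obtain ⟨i, hi, hc⟩ := h
  obtain ⟨h1, h2⟩ := (PySem.List.mem_combinations_iff _ _ _).mp hc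
  exact ⟨h1, by omega, by omega⟩

lemma allComs_sorted {relation : List (List String)} {c : List Nat} (h : c ∈ allComs relation) :
    c.Pairwise (· < ·) := by
  exact List.Pairwise.sublist (mem_allComs h).1 List.pairwise_lt_range

lemma allComs_nodup (relation : List (List String)) : (allComs relation).Nodup := by
  rw [allComs, List.Nodup, List.pairwise_flatMap]
  constructor
  · intro i _
    exact combinations_nodup _ _ List.nodup_range
  · refine List.Pairwise.imp ?_ List.pairwise_lt_range
    intro i j hij x hx y hy hxy
    have hxl := ((PySem.List.mem_combinations_iff _ _ _).mp hx).2
    have hyl := ((PySem.List.mem_combinations_iff _ _ _).mp hy).2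
    rw [hxy] at hxl
    omega

lemma allComs_pairwise_len (relation : List (List String)) :
    (allComs relation).Pairwise (fun a b => a.length ≤ b.length) := by
  rw [allComs, List.pairwise_flatMap]
  constructor
  · intro i _
    refine List.pairwise_of_forall_mem_list ?_
    intro a ha b hb
    have hal := ((PySem.List.mem_combinations_iff _ _ _).mp ha).2
    have hbl := ((PySem.List.mem_combinations_iff _ _ _).mp hb).2
    omega
  · refine List.Pairwise.imp ?_ List.pairwise_lt_range
    intro i j hij x hx y hy
    have hxl := ((PySem.List.mem_combinations_iff _ _ _).mp hx).2
    have hyl := ((PySem.List.mem_combinations_iff _ _ _).mp hy).2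
    omega

lemma minT_iff (sk : List (List Nat)) (c : List Nat) :
    minT sk c = true ↔ ∀ s ∈ sk, s ≠ c → ¬ (∀ x ∈ s, x ∈ c) := by
  simp only [minT, List.all_eq_true, Bool.or_eq_true, beq_iff_eq, Bool.not_eq_true',
    List.all_eq_false, decide_eq_true_eq]
  constructor
  · intro h s hs
    have := h s hs
    tauto
  · intro h s hs
    by_cases hsc : s = c
    · exact Or.inl hsc
    · have := h s hs hsc
      push Not at this
      exact Or.inr this

-- a superkey strictly set-contained in com ∈ allComs yields a MINIMAL superkey strictly
-- shorter than com
lemma minimal_witness (relation : List (List String)) {s com : List Nat}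
    (hs : s ∈ (allComs relation).filter (superT relation)) (hcom : com ∈ allComs relation)
    (hne : s ≠ com) (hsub : ∀ x ∈ s, x ∈ com) :
    ∃ m ∈ (allComs relation).filter (superT relation),
      m.length < com.length ∧ (∀ x ∈ m, x ∈ com) ∧
      minT ((allComs relation).filter (superT relation)) m = true := by
  have hsall := (List.mem_filter.mp hs).1
  have hsl := sublist_of_subset_sorted s com (allComs_sorted hsall) (allComs_sorted hcom) hsub
  have hlt : s.length < com.length := by
    rcases Nat.lt_or_ge s.length com.length with h | h
    · exact h
    · exact absurd (hsl.eq_of_length (by have := hsl.length_le; omega)) hne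
  obtain ⟨m, hm1, hm2, hm3⟩ := exists_minimal ((allComs relation).filter (superT relation))
    (fun t ht => allComs_sorted (List.mem_filter.mp ht).1) s.length s le_rfl hs
  have hml : m.length ≤ s.length :=
    (sublist_of_subset_sorted m s (allComs_sorted (List.mem_filter.mp hm1).1)
      (allComs_sorted hsall) hm2).length_le
  exact ⟨m, hm1, by omega, fun x hx => hsub x (hm2 x hx), hm3⟩

-- A's accepted list equals the filter of all combinations by superkey-ness and global minimality
lemma A_fold (relation : List (List String)) :
    ∀ (rest pre : List (List Nat)), allComs relation = pre ++ rest →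
    rest.foldl (fun u com =>
        if superT relation com && u.all (fun item => !(item.all (fun x => com.contains x)))
        then u ++ [com] else u)
      (pre.filter (fun c => superT relation c &&
        minT ((allComs relation).filter (superT relation)) c))
    = (allComs relation).filter (fun c => superT relation c &&
        minT ((allComs relation).filter (superT relation)) c) := by
  intro rest
  induction rest with
  | nil =>
    intro pre hc
    rw [List.append_nil] at hc
    rw [List.foldl_nil, hc]
  | cons com rest ih =>
    intro pre hc
    rw [List.foldl_cons]
    have hcom : com ∈ allComs relation := by rw [hc]; exact List.mem_append_right _ List.mem_cons_self
    have hcond : (superT relation com &&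
        (pre.filter (fun c => superT relation c &&
          minT ((allComs relation).filter (superT relation)) c)).all
          (fun item => !(item.all (fun x => com.contains x))))
        = (superT relation com && minT ((allComs relation).filter (superT relation)) com) := by
      cases hsup : superT relation com
      · simp
      · simp only [Bool.true_and]
        rw [Bool.eq_iff_iff]
        simp only [List.all_eq_true, Bool.not_eq_true', List.all_eq_false, List.mem_filter,
          Bool.and_eq_true, List.contains_eq_mem]
        constructor
        · intro hall
          rw [minT_iff]
          intro s hsmem hne hsub
          obtain ⟨m, hm1, hmlt, hmsub, hmmin⟩ := minimal_witness relation hsmem hcom hne hsub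
          have hmpre : m ∈ pre := by
            have hmall := (List.mem_filter.mp hm1).1
            rw [hc] at hmall
            rcases List.mem_append.mp hmall with h | h
            · exact h
            · exfalso
              have hpair := allComs_pairwise_len relation
              rw [hc] at hpair
              have hcross := (List.pairwise_append.mp hpair).2.1
              rcases List.mem_cons.mp h with h1 | h1
              · rw [h1] at hmlt; omega
              · have := (List.pairwise_cons.mp (List.pairwise_append.mp hpair).2.1).1 m h1
                omega
          obtain ⟨x, hx1, hx2⟩ := hall m ⟨hmpre, (List.mem_filter.mp hm1).2, hmmin⟩
          exact absurd (hmsub x hx1) (by simpa using hx2)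
        · intro hmin item hitem
          obtain ⟨hpre, hsupi, hmini⟩ := hitem
          have hitem : item ∈ (allComs relation).filter (superT relation) := by
            refine List.mem_filter.mpr ⟨?_, hsupi⟩
            rw [hc]; exact List.mem_append_left _ hpre
          have hne : item ≠ com := by
            intro heq
            have hnd := allComs_nodup relation
            rw [hc] at hnd
            have hdisj := (List.nodup_append.mp hnd).2.2
            exact hdisj item hpre com List.mem_cons_self heq
          have := (minT_iff _ _).mp hmin item hitem hne
          by_contra hcon
          push Not at hcon
          exact this (by simpa using hcon)
    rw [hcond]
    have hstep : (if superT relation com &&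
          minT ((allComs relation).filter (superT relation)) com
        then (pre.filter (fun c => superT relation c &&
          minT ((allComs relation).filter (superT relation)) c)) ++ [com]
        else (pre.filter (fun c => superT relation c &&
          minT ((allComs relation).filter (superT relation)) c)))
        = (pre ++ [com]).filter (fun c => superT relation c &&
          minT ((allComs relation).filter (superT relation)) c) := by
      rw [List.filter_append]
      by_cases hF : (superT relation com &&
          minT ((allComs relation).filter (superT relation)) com) = true <;>
        simp [hF]
    rw [hstep]
    exact ih (pre ++ [com]) (by rw [hc]; simp)

lemma ofList_sublist {α : Type} [BEq α] [LawfulBEq α] (xs : List α) :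
    (PySem.Set.ofList xs).Sublist xs := by
  induction xs using List.reverseRecOn with
  | nil => simp [PySem.Set.ofList_nil]
  | append_singleton xs x ih =>
    rw [PySem.Set.ofList_append_singleton, PySem.Set.add_eq_ite]
    split
    · exact ih.trans (List.sublist_append_left _ _)
    · exact List.Sublist.append ih (List.Sublist.refl _)

lemma ofList_length_iff {α : Type} [BEq α] [LawfulBEq α] (xs : List α) :
    (PySem.Set.ofList xs).length = xs.length ↔ xs.Nodup := by
  constructor
  · intro h
    have heq := (ofList_sublist xs).eq_of_length h
    rw [← heq]
    exact PySem.Set.nodup_ofList xs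
  · intro h
    exact congrArg List.length (PySem.Set.ofList_eq_self_of_nodup xs h)

lemma fold_add_filter {α : Type} [BEq α] [LawfulBEq α] (l : List α) (p : α → Bool) :
    ∀ s0 : PySem.Set α, l.Nodup → (∀ c ∈ l, c ∉ s0) →
    l.foldl (fun s c => if p c then PySem.Set.add s c else s) s0 = s0 ++ l.filter p := by
  induction l with
  | nil => intro s0 _ _; simp
  | cons c l ih =>
    intro s0 hnd hf
    rw [List.foldl_cons, List.filter_cons]
    by_cases hp : p c = true
    · rw [if_pos hp, PySem.Set.add_of_not_mem (hf c List.mem_cons_self)]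
      rw [ih (s0 ++ [c]) (List.nodup_cons.mp hnd).2 ?_]
      · simp [hp]
      · intro d hd hmem
        rcases List.mem_append.mp hmem with h | h
        · exact hf d (List.mem_cons_of_mem _ hd) h
        · have : d = c := by simpa using h
          exact (List.nodup_cons.mp hnd).1 (this ▸ hd)
    · rw [if_neg hp, ih s0 (List.nodup_cons.mp hnd).2
        (fun d hd => hf d (List.mem_cons_of_mem _ hd))]
      simp [hp]

lemma foldl_foldl_flatMap {α β γ : Type} (l : List α) (f : α → List β)
    (g : γ → β → γ) (b : γ) :
    l.foldl (fun acc a => (f a).foldl g acc) b = (l.flatMap f).foldl g b := by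
  rw [List.flatMap_def, List.foldl_flatten, List.foldl_map]

lemma mem_drop_range (n r : Nat) : r ∈ (List.range n).drop 1 ↔ 1 ≤ r ∧ r < n := by
  cases n with
  | zero => simp
  | succ n =>
    rw [List.range_succ_eq_map]
    simp only [List.drop_succ_cons, List.drop_zero, List.mem_map, List.mem_range]
    constructor
    · rintro ⟨k, hk, rfl⟩; omega
    · intro h; exact ⟨r - 1, by omega, by omega⟩

-- A's uniqueness loop computes the superkey test
lemma uniLoop_eq_superT (relation : List (List String)) (com : List Nat) :
    (relation.map (fun rel => com.map (fun i => rel.getD i ""))).foldl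
      (fun uni t => if (relation.map (fun rel => com.map (fun i => rel.getD i ""))).count t != 1
                    then false else uni) true
    = superT relation com := by
  rw [PySem.List.foldl_if_false_eq, Bool.eq_iff_iff]
  simp only [superT, projAll, Bool.true_and, Bool.not_eq_true', List.any_eq_false, bne_iff_ne,
    ne_eq, not_not, decide_eq_true_eq]
  exact (List.nodup_iff_count_eq_one).symm

-- B's minimality test agrees with minT on members of the superkey list
lemma minB_eq_minT (relation : List (List String)) (key : List Nat)
    (hk : key ∈ (allComs relation).filter (superT relation)) :
    ((List.range key.length).drop 1).all (fun r =>
      (PySem.List.combinations key r).all (fun sub =>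
        !(PySem.Set.contains ((allComs relation).filter (superT relation)) sub)))
    = minT ((allComs relation).filter (superT relation)) key := by
  rw [Bool.eq_iff_iff]
  have hkeyall := (List.mem_filter.mp hk).1
  constructor
  · intro hB
    rw [minT_iff]
    intro s hs hne hsub
    have hsall := (List.mem_filter.mp hs).1
    have hsl := sublist_of_subset_sorted s key (allComs_sorted hsall) (allComs_sorted hkeyall) hsub
    have h1 : 1 ≤ s.length := (mem_allComs hsall).2.1
    have hlt : s.length < key.length := by
      rcases Nat.lt_or_ge s.length key.length with h | h
      · exact h
      · exact absurd (hsl.eq_of_length (by have := hsl.length_le; omega)) hne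
    simp only [List.all_eq_true] at hB
    have hr : s.length ∈ (List.range key.length).drop 1 := (mem_drop_range _ _).mpr ⟨h1, hlt⟩
    have hmem := hB s.length hr s ((PySem.List.mem_combinations_iff _ _ _).mpr ⟨hsl, rfl⟩)
    simp only [Bool.not_eq_true'] at hmem
    have hc := (PySem.Set.contains_iff _ _).mpr hs
    rw [hmem] at hc
    simp at hc
  · intro hmin
    simp only [List.all_eq_true]
    intro r hr sub hsubmem
    obtain ⟨hsl, hlen⟩ := (PySem.List.mem_combinations_iff _ _ _).mp hsubmem
    have hrb := (mem_drop_range _ _).mp hr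
    cases hcb : PySem.Set.contains ((allComs relation).filter (superT relation)) sub
    · simp
    · exfalso
      have hsubin := (PySem.Set.contains_iff _ _).mp hcb
      have hne : sub ≠ key := by intro h; rw [h] at hlen; omega
      exact (minT_iff _ _).mp hmin sub hsubin hne (fun x hx => hsl.subset hx)

-- B's superkey set is the filtered combination list
lemma B_superkeys (relation : List (List String)) :
    ((List.range relation.length).foldl (fun sk size =>
      (PySem.List.combinations (List.range ((relation.headD []).length)) (size + 1)).foldl
        (fun sk com =>
          let proj := relation.map (fun row => com.map (fun c => row.getD c ""))
          if (PySem.Set.ofList proj).length = proj.length then PySem.Set.add sk com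
          else sk) sk) PySem.Set.empty)
    = (allComs relation).filter (superT relation) := by
  have hfun : (fun (sk : PySem.Set (List Nat)) (com : List Nat) =>
      let proj := relation.map (fun row => com.map (fun c => row.getD c ""))
      if (PySem.Set.ofList proj).length = proj.length then PySem.Set.add sk com else sk)
      = fun (sk : PySem.Set (List Nat)) (com : List Nat) =>
        if superT relation com then PySem.Set.add sk com else sk := by
    funext sk com
    by_cases h : (relation.map (fun row => com.map (fun c => row.getD c ""))).Nodup
    · have h1 : superT relation com = true := by simp [superT, projAll]; exact h
      simp only [h1, if_true]
      rw [if_pos ((ofList_length_iff _).mpr h)]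
    · have h1 : superT relation com = false := by simp [superT, projAll]; exact h
      simp only [h1, Bool.false_eq_true, if_false]
      rw [if_neg (fun hc => h ((ofList_length_iff _).mp hc))]
  rw [hfun, foldl_foldl_flatMap]
  have hall : (List.range relation.length).flatMap
      (fun size => PySem.List.combinations (List.range ((relation.headD []).length)) (size + 1))
      = allComs relation := rfl
  rw [hall]
  rw [fold_add_filter (allComs relation) (superT relation) PySem.Set.empty
    (allComs_nodup relation) (by intro c _ hc; simp [PySem.Set.empty] at hc)]
  simp [PySem.Set.empty]

-- ===== VERDICT (by name: the statement is the Claim_ definition above) =====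
theorem solution_spec : Claim_equal_solution := by
  unfold Claim_equal_solution
  intro relation _ _
  unfold Spec_solution
  have hA : solution relation
      = (((allComs relation).filter (fun c => superT relation c &&
          minT ((allComs relation).filter (superT relation)) c)).length : Int) := by
    simp only [solution]
    rw [PySem.List.foldl_append_eq_flatMap, List.nil_append]
    have hall : (List.range relation.length).flatMap
        (fun i => PySem.List.combinations (List.range ((relation.headD []).length)) (i + 1))
        = allComs relation := rfl
    rw [hall]
    have hstep : ∀ com ∈ allComs relation, ∀ u : List (List Nat),
        (let tmp := relation.map (fun rel => com.map (fun i => rel.getD i ""))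
         let uni := tmp.foldl (fun uni t => if tmp.count t != 1 then false else uni) true
         if uni then
           let mini := u.foldl (fun mini item =>
             if item.all (fun x => com.contains x) then false else mini) true
           if mini then u ++ [com] else u
         else u)
        = if superT relation com && u.all (fun item => !(item.all (fun x => com.contains x)))
          then u ++ [com] else u := by
      intro com _ u
      simp only [uniLoop_eq_superT]
      simp only [PySem.List.foldl_if_false_eq, Bool.true_and, List.not_any_eq_all_not]
      cases hsup : superT relation com
      · simp
      · simp
    rw [PySem.List.foldl_congr_mem' (allComs relation)
      (fun unique com =>
        let tmp := relation.map (fun rel => com.map (fun i => rel.getD i ""))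
        let uni := tmp.foldl (fun uni t => if tmp.count t != 1 then false else uni) true
        if uni then
          let mini := unique.foldl (fun mini item =>
            if item.all (fun x => com.contains x) then false else mini) true
          if mini then unique ++ [com] else unique
        else unique)
      (fun u com =>
        if superT relation com && u.all (fun item => !(item.all (fun x => com.contains x)))
        then u ++ [com] else u)
      [] hstep]
    have hAfold := A_fold relation (allComs relation) [] (List.nil_append _).symm
    simp only [List.filter_nil] at hAfold
    rw [hAfold]
  have hB : solution_alt relation
      = ((((allComs relation).filter (superT relation)).countP
          (fun key => ((List.range key.length).drop 1).all (fun r =>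
            (PySem.List.combinations key r).all (fun sub =>
              !(PySem.Set.contains ((allComs relation).filter (superT relation)) sub))))) : Int) := by
    simp only [solution_alt]
    rw [B_superkeys relation]
    rw [PySem.List.foldl_if_add_one]
    simp
  rw [hA, hB]
  have hnat : ((allComs relation).filter (fun c => superT relation c &&
        minT ((allComs relation).filter (superT relation)) c)).length
      = ((allComs relation).filter (superT relation)).countP
          (fun key => ((List.range key.length).drop 1).all (fun r =>
            (PySem.List.combinations key r).all (fun sub =>
              !(PySem.Set.contains ((allComs relation).filter (superT relation)) sub)))) := by
    rw [List.countP_eq_length_filter]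
    rw [List.filter_congr (fun a ha => minB_eq_minT relation a ha)]
    rw [List.filter_filter]
    have hand : (fun c => superT relation c &&
          minT ((allComs relation).filter (superT relation)) c)
        = (fun c => minT ((allComs relation).filter (superT relation)) c &&
          superT relation c) := funext fun c => Bool.and_comm _ _
    rw [hand]
  rw [hnat]
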